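-- pv_equiv track=rewrite | github.com/Sujai1/local-search-discovery | UAI2025SupplementalMaterial/Experimental Code/sachs_data_run.py | check_PP2_L
-- ===== SOURCE A (Python) =====
-- def check_PP2_L(i, PRS, d):
--     '''Checks whether PP2 criterion holds for i: i must be identified in PP2 relation with at least one j to be a root, and if a j is in PP2 relation with i,
--     i cannot be a root.'''
--     pot_root = True
--     count = 0
--     for j in range(d):
--         if j!=i:
--             if (j,i) in PRS and PRS[(j,i)] == 'PP2':
--                 pot_root = False
--             if (i,j) in PRS and PRS[(i,j)] == 'PP2':
--                 count = 1
--     if count == 0: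
--        pot_root = False
--     return pot_root
-- ===== SOURCE B (Python) =====
-- def check_PP2_L(i, PRS, d):
--     incoming = False
--     outgoing = False
--     for (a, b), rel in PRS.items():
--         if rel != 'PP2':
--             continue
--         if b == i and a != i and 0 <= a < d:
--             incoming = True
--         if a == i and b != i and 0 <= b < d:
--             outgoing = True
--     return outgoing and not incoming
-- ===== Notes on version B (the rewrite author's own statement) =====
-- stated objective: faster
-- what changed: B iterates once over the PRS dictionary's items, classifying each PP2 pair as incoming or outgoing for i under range(d) bounds checks, instead of probing the dictionary with two lookups for every index j in range(d).
import Mathlib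
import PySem

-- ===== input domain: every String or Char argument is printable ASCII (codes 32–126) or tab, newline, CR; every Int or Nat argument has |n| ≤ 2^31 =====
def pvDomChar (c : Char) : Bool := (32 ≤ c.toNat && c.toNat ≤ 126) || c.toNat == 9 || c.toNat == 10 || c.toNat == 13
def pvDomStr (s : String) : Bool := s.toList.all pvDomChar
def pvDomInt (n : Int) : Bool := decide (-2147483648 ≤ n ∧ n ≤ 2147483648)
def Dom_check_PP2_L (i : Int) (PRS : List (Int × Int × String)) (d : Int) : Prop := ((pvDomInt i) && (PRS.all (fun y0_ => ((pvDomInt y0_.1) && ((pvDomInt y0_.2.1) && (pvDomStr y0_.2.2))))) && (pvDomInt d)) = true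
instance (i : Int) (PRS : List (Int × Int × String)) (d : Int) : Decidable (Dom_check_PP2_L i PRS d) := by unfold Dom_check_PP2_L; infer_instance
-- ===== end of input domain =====

-- B iterates once over the PRS items classifying each PP2 pair (incoming/outgoing for i)
-- instead of probing the dict with two lookups for every j in range(d): O(|PRS|) instead of O(d).

-- first-match lookup of key (a,b) in the association list (Python dict lookup)
def prsGet? (PRS : List (Int × Int × String)) (a b : Int) : Option String :=
  match PRS with
  | [] => none
  | (x, y, r) :: t => if x = a ∧ y = b then some r else prsGet? t a b

-- ===== PORT A =====
def check_PP2_L (i : Int) (PRS : List (Int × Int × String)) (d : Int) : Bool :=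
  let st := (PySem.List.pyRange 0 d 1).foldl
    (fun (st : Bool × Int) j =>
      if j ≠ i then
        ((if prsGet? PRS j i = some "PP2" then false else st.1),
         (if prsGet? PRS i j = some "PP2" then (1 : Int) else st.2))
      else st)
    (true, (0 : Int))
  if st.2 = 0 then false else st.1

-- ===== PORT B =====
def check_PP2_L_alt (i : Int) (PRS : List (Int × Int × String)) (d : Int) : Bool :=
  let st := PRS.foldl
    (fun (st : Bool × Bool) p =>
      if p.2.2 ≠ "PP2" then st
      else
        ((if p.2.1 = i ∧ p.1 ≠ i ∧ 0 ≤ p.1 ∧ p.1 < d then true else st.1),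
         (if p.1 = i ∧ p.2.1 ≠ i ∧ 0 ≤ p.2.1 ∧ p.2.1 < d then true else st.2)))
    (false, false)
  st.2 && !st.1

-- ===== PRECONDITION & SPEC =====
-- Pre_ excludes association lists with duplicate (Int × Int) keys: a Python dict cannot
-- contain a duplicate key, so these lists represent no input of the Python programs.
def Pre_check_PP2_L (i : Int) (PRS : List (Int × Int × String)) (d : Int) : Prop :=
  (PRS.map (fun p => (p.1, p.2.1))).Nodup
instance (i : Int) (PRS : List (Int × Int × String)) (d : Int) : Decidable (Pre_check_PP2_L i PRS d) := by unfold Pre_check_PP2_L; infer_instance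

def pvWitness_check_PP2_L : Int × (List (Int × Int × String)) × Int :=
  (0, [(0, 1, "PP2"), (2, 0, "PP1")], 3)

def Spec_check_PP2_L (i : Int) (PRS : List (Int × Int × String)) (d : Int) (out : Bool) : Prop := out = check_PP2_L_alt i PRS d
instance (i : Int) (PRS : List (Int × Int × String)) (d : Int) (out : Bool) : Decidable (Spec_check_PP2_L i PRS d out) := by unfold Spec_check_PP2_L; infer_instance

-- ===== CLAIM (what is proved, stated in full; the proofs are below) =====
def Claim_equal_check_PP2_L : Prop := ∀ (i : Int) (PRS : List (Int × Int × String)) (d : Int), Dom_check_PP2_L i PRS d → Pre_check_PP2_L i PRS d → Spec_check_PP2_L i PRS d (check_PP2_L i PRS d)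

-- ===== LEMMAS AND PROOFS =====

-- membership from a successful lookup (no hypotheses needed)
theorem mem_of_prsGet (PRS : List (Int × Int × String)) (a b : Int) (r : String)
    (h : prsGet? PRS a b = some r) : (a, b, r) ∈ PRS := by
  induction PRS with
  | nil => simp [prsGet?] at h
  | cons p t ih =>
    obtain ⟨x, y, s⟩ := p
    simp only [prsGet?] at h
    by_cases hk : x = a ∧ y = b
    · simp [hk] at h
      simp [hk.1, hk.2, h]
    · simp [hk] at h
      exact List.mem_cons_of_mem _ (ih h)

-- lookup from membership, when keys are distinct
theorem prsGet_of_mem (PRS : List (Int × Int × String)) (a b : Int) (r : String)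
    (hnd : (PRS.map (fun p => (p.1, p.2.1))).Nodup)
    (h : (a, b, r) ∈ PRS) : prsGet? PRS a b = some r := by
  induction PRS with
  | nil => simp at h
  | cons p t ih =>
    obtain ⟨x, y, s⟩ := p
    simp only [List.map_cons, List.nodup_cons] at hnd
    rcases List.mem_cons.mp h with h1 | h1
    · obtain ⟨hx, hy, hs⟩ : a = x ∧ b = y ∧ r = s := by simpa using h1
      simp [prsGet?, hx, hy, hs]
    · simp only [prsGet?]
      by_cases hk : x = a ∧ y = b
      · exfalso
        apply hnd.1
        have hm : ((a, b) : Int × Int) ∈ t.map (fun p => (p.1, p.2.1)) :=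
          List.mem_map.mpr ⟨(a, b, r), h1, rfl⟩
        rw [hk.1, hk.2]; exact hm
      · rw [if_neg hk]; exact ih hnd.2 h1

-- characterisation of A's fold
theorem foldA_char (i : Int) (PRS : List (Int × Int × String)) (L : List Int) (p : Bool) (c : Int) :
    L.foldl (fun (st : Bool × Int) j =>
      if j ≠ i then
        ((if prsGet? PRS j i = some "PP2" then false else st.1),
         (if prsGet? PRS i j = some "PP2" then (1 : Int) else st.2))
      else st) (p, c)
    = ((p && !(L.any (fun j => decide (j ≠ i) && decide (prsGet? PRS j i = some "PP2")))),
       (if L.any (fun j => decide (j ≠ i) && decide (prsGet? PRS i j = some "PP2")) then 1 else c)) := by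
  induction L generalizing p c with
  | nil => simp
  | cons j t ih =>
    rw [List.foldl_cons]
    by_cases hj : j ≠ i
    · simp only [if_pos hj]
      by_cases h1 : prsGet? PRS j i = some "PP2" <;>
        by_cases h2 : prsGet? PRS i j = some "PP2" <;>
          · simp only [if_pos, if_neg, h1, h2, ite_true, ite_false]
            rw [ih]
            simp [List.any_cons, h1, h2, hj]
    · simp only [if_neg hj]
      rw [ih]
      have hj' : j = i := not_not.mp hj
      simp [List.any_cons, hj']

-- characterisation of B's fold
theorem foldB_char (i d : Int) (PRS : List (Int × Int × String)) (inc out : Bool) :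
    PRS.foldl (fun (st : Bool × Bool) p =>
      if p.2.2 ≠ "PP2" then st
      else
        ((if p.2.1 = i ∧ p.1 ≠ i ∧ 0 ≤ p.1 ∧ p.1 < d then true else st.1),
         (if p.1 = i ∧ p.2.1 ≠ i ∧ 0 ≤ p.2.1 ∧ p.2.1 < d then true else st.2))) (inc, out)
    = ((inc || PRS.any (fun p => decide (p.2.2 = "PP2") && decide (p.2.1 = i ∧ p.1 ≠ i ∧ 0 ≤ p.1 ∧ p.1 < d))),
       (out || PRS.any (fun p => decide (p.2.2 = "PP2") && decide (p.1 = i ∧ p.2.1 ≠ i ∧ 0 ≤ p.2.1 ∧ p.2.1 < d)))) := by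
  induction PRS generalizing inc out with
  | nil => simp
  | cons q t ih =>
    rw [List.foldl_cons]
    by_cases hr : q.2.2 ≠ "PP2"
    · simp only [if_pos hr]
      rw [ih]
      have hr' : ¬ q.2.2 = "PP2" := hr
      simp [List.any_cons, hr']
    · simp only [if_neg hr]
      have hr' : q.2.2 = "PP2" := not_not.mp hr
      by_cases h1 : q.2.1 = i ∧ q.1 ≠ i ∧ 0 ≤ q.1 ∧ q.1 < d <;>
        by_cases h2 : q.1 = i ∧ q.2.1 ≠ i ∧ 0 ≤ q.2.1 ∧ q.2.1 < d <;>
          · simp only [if_pos, if_neg, h1, h2, ite_true, ite_false]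
            rw [ih]
            simp [List.any_cons, hr', h1, h2, -Bool.decide_and]

-- the two "incoming" existentials agree under distinct keys
theorem any_in_eq (i d : Int) (PRS : List (Int × Int × String))
    (hnd : (PRS.map (fun p => (p.1, p.2.1))).Nodup) :
    (PySem.List.pyRange 0 d 1).any (fun j => decide (j ≠ i) && decide (prsGet? PRS j i = some "PP2"))
    = PRS.any (fun p => decide (p.2.2 = "PP2") && decide (p.2.1 = i ∧ p.1 ≠ i ∧ 0 ≤ p.1 ∧ p.1 < d)) := by
  rw [Bool.eq_iff_iff]
  simp only [List.any_eq_true, Bool.and_eq_true, decide_eq_true_eq, PySem.List.mem_pyRange_one]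
  constructor
  · rintro ⟨j, ⟨hj0, hjd⟩, hji, hget⟩
    refine ⟨(j, i, "PP2"), mem_of_prsGet PRS j i "PP2" hget, ?_⟩
    dsimp only
    exact ⟨rfl, rfl, hji, hj0, hjd⟩
  · rintro ⟨⟨a, b, r⟩, hmem, hr, hb, ha, h0, hd⟩
    dsimp only at hr hb ha h0 hd
    refine ⟨a, ⟨h0, hd⟩, ha, ?_⟩
    have hh := prsGet_of_mem PRS a b r hnd hmem
    rw [hb, hr] at hh; exact hh

-- the two "outgoing" existentials agree under distinct keys
theorem any_out_eq (i d : Int) (PRS : List (Int × Int × String))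
    (hnd : (PRS.map (fun p => (p.1, p.2.1))).Nodup) :
    (PySem.List.pyRange 0 d 1).any (fun j => decide (j ≠ i) && decide (prsGet? PRS i j = some "PP2"))
    = PRS.any (fun p => decide (p.2.2 = "PP2") && decide (p.1 = i ∧ p.2.1 ≠ i ∧ 0 ≤ p.2.1 ∧ p.2.1 < d)) := by
  rw [Bool.eq_iff_iff]
  simp only [List.any_eq_true, Bool.and_eq_true, decide_eq_true_eq, PySem.List.mem_pyRange_one]
  constructor
  · rintro ⟨j, ⟨hj0, hjd⟩, hji, hget⟩
    refine ⟨(i, j, "PP2"), mem_of_prsGet PRS i j "PP2" hget, ?_⟩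
    dsimp only
    exact ⟨rfl, rfl, hji, hj0, hjd⟩
  · rintro ⟨⟨a, b, r⟩, hmem, hr, ha, hb, h0, hd⟩
    dsimp only at hr ha hb h0 hd
    refine ⟨b, ⟨h0, hd⟩, hb, ?_⟩
    have hh := prsGet_of_mem PRS a b r hnd hmem
    rw [ha, hr] at hh; exact hh

-- ===== VERDICT (by name: the statement is the Claim_ definition above) =====
theorem check_PP2_L_spec : Claim_equal_check_PP2_L := by
  intro i PRS d _ hpre
  unfold Spec_check_PP2_L check_PP2_L check_PP2_L_alt
  rw [foldA_char, foldB_char]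
  simp only [Bool.false_or]
  rw [any_in_eq i d PRS hpre, any_out_eq i d PRS hpre]
  cases h1 : PRS.any (fun p => decide (p.2.2 = "PP2") && decide (p.2.1 = i ∧ p.1 ≠ i ∧ 0 ≤ p.1 ∧ p.1 < d)) <;>
    cases h2 : PRS.any (fun p => decide (p.2.2 = "PP2") && decide (p.1 = i ∧ p.2.1 ≠ i ∧ 0 ≤ p.2.1 ∧ p.2.1 < d)) <;>
      simp
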